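-- pv_equiv track=rewrite | github.com/egeulgen/Bioinformatics_Stronghold | solutions/mgap.py | max_gap_symbols
-- ===== SOURCE A (Python) =====
-- def max_gap_symbols(str1, str2):
--     str1 = "-" + str1
--     str2 = "-" + str2
--
--     score_mat = [[0 for i in range(len(str2))] for j in range(len(str1))]
--
--     for i in range(1, len(str1)):
--         for j in range(1, len(str2)):
--             if str1[i] == str2[j]:
--                 score_mat[i][j] = score_mat[i - 1][j - 1] + 1
--             else:
--                 score_mat[i][j] = max(score_mat[i][j -1], score_mat[i - 1][j])
--
--     return len(str1) - 1 + len(str2) - 1 - 2 * score_mat[len(str1) - 1][len(str2) - 1]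
-- ===== SOURCE B (Python) =====
-- def max_gap_symbols(str1, str2):
--     memo = {}
--     stack = [(len(str1), len(str2), False)]
--     while stack:
--         i, j, expanded = stack.pop()
--         key = (i, j)
--         if key in memo:
--             continue
--         if i == 0 or j == 0:
--             memo[key] = 0
--         elif str1[i - 1] == str2[j - 1]:
--             if expanded:
--                 memo[key] = memo[(i - 1, j - 1)] + 1
--             else:
--                 d = memo.get((i - 1, j - 1))
--                 if d is not None:
--                     memo[key] = d + 1
--                 else:
--                     stack.append((i, j, True))
--                     stack.append((i - 1, j - 1, False))
--         elif expanded: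
--             a = memo[(i - 1, j)]
--             b = memo[(i, j - 1)]
--             memo[key] = a if a >= b else b
--         else:
--             a = memo.get((i - 1, j))
--             b = memo.get((i, j - 1))
--             if a is not None and b is not None:
--                 memo[key] = a if a >= b else b
--             else:
--                 stack.append((i, j, True))
--                 if b is None:
--                     stack.append((i, j - 1, False))
--                 if a is None:
--                     stack.append((i - 1, j, False))
--     return len(str1) + len(str2) - 2 * memo[(len(str1), len(str2))]
-- ===== Notes on version B (the rewrite author's own statement) =====
-- stated objective: alternative
-- what changed: Replaces A's bottom-up fill of a dense (len1+1)x(len2+1) score matrix by demand-driven top-down memoized recursion on the LCS recurrence, run on an explicit stack of (i, j, expanded) frames with a dict of visited index pairs as the cache.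
import Mathlib
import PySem

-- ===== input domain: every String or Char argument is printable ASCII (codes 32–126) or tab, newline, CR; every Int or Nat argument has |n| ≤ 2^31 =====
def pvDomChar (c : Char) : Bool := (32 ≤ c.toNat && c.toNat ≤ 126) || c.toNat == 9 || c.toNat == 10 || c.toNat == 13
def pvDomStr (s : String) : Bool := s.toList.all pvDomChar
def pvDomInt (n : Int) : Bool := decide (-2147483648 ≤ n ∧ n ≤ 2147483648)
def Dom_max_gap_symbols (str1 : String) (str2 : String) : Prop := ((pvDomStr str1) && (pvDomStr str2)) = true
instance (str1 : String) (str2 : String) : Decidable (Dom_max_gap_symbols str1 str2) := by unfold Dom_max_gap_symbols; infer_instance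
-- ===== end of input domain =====

-- B replaces A's bottom-up fill of a dense score matrix by demand-driven top-down
-- memoized recursion on the LCS recurrence, run on an explicit stack of frames with
-- a dict of visited index pairs as the cache (alternative decomposition, same cost).

-- ===== PORT A =====
-- A's inner-loop body: set score_mat[i][j] (all indices are in range here, so getD is exact).
def mgapInnerStep (s1 s2 : List Char) (i : Int) (mat : List (List Int)) (j : Int) : List (List Int) :=
  let v : Int :=
    if s1.getD i.toNat '-' = s2.getD j.toNat '-' then
      ((mat.getD (i - 1).toNat []).getD (j - 1).toNat 0) + 1
    else
      max ((mat.getD i.toNat []).getD (j - 1).toNat 0)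
          ((mat.getD (i - 1).toNat []).getD j.toNat 0)
  mat.set i.toNat ((mat.getD i.toNat []).set j.toNat v)

def max_gap_symbols (str1 : String) (str2 : String) : Int :=
  let s1 : List Char := '-' :: str1.toList          -- str1 = "-" + str1
  let s2 : List Char := '-' :: str2.toList          -- str2 = "-" + str2
  let mat0 : List (List Int) := List.replicate s1.length (List.replicate s2.length 0)
  let mat := (PySem.List.pyRange 1 (s1.length : Int) 1).foldl
      (fun mat i => (PySem.List.pyRange 1 (s2.length : Int) 1).foldl (mgapInnerStep s1 s2 i) mat)
      mat0
  (s1.length : Int) - 1 + (s2.length : Int) - 1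
    - 2 * ((mat.getD (s1.length - 1) []).getD (s2.length - 1) 0)

-- ===== PORT B =====
-- Frames are (i, j, expanded); the Lean stack's head is the Python list's END (the pop side).
-- Termination weight of one frame / of the whole stack (cited by mgapRun's decreasing_by).
def mgapFw : Nat × Nat × Bool → Nat
  | (i, j, false) => 2 * 5 ^ (i + j)
  | (i, j, true) => 5 ^ (i + j)

def mgapMu (st : List (Nat × Nat × Bool)) : Nat := (st.map mgapFw).sum

theorem mgapFw_pos (f : Nat × Nat × Bool) : 0 < mgapFw f := by
  rcases f with ⟨i, j, (_ | _)⟩ <;> simp [mgapFw]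

theorem mgapMu_lt_pop (f : Nat × Nat × Bool) (st : List (Nat × Nat × Bool)) :
    mgapMu st < mgapMu (f :: st) := by
  have := mgapFw_pos f
  simp [mgapMu]
  omega

theorem mgapMu_lt_push1 (i j : Nat) (hi : i ≠ 0) (hj : j ≠ 0) (st : List (Nat × Nat × Bool)) :
    mgapMu ((i - 1, j - 1, false) :: (i, j, true) :: st) < mgapMu ((i, j, false) :: st) := by
  obtain ⟨i', rfl⟩ : ∃ i', i = i' + 1 := ⟨i - 1, by omega⟩
  obtain ⟨j', rfl⟩ : ∃ j', j = j' + 1 := ⟨j - 1, by omega⟩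
  have hx : 0 < 5 ^ (i' + j') := by positivity
  simp only [mgapMu, List.map_cons, List.sum_cons, mgapFw, Nat.add_succ_sub_one, Nat.add_zero]
  have h1 : i' + 1 + (j' + 1) = i' + j' + 2 := by omega
  rw [h1]
  have h2 : (5 : Nat) ^ (i' + j' + 2) = 25 * 5 ^ (i' + j') := by ring
  rw [h2]
  omega

theorem mgapMu_lt_push2 (i j : Nat) (hi : i ≠ 0) (hj : j ≠ 0)
    (l1 l2 : List (Nat × Nat × Bool))
    (h1 : mgapMu l1 ≤ 2 * 5 ^ (i - 1 + j)) (h2 : mgapMu l2 ≤ 2 * 5 ^ (i + (j - 1)))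
    (st : List (Nat × Nat × Bool)) :
    mgapMu (l1 ++ l2 ++ (i, j, true) :: st) < mgapMu ((i, j, false) :: st) := by
  obtain ⟨i', rfl⟩ : ∃ i', i = i' + 1 := ⟨i - 1, by omega⟩
  obtain ⟨j', rfl⟩ : ∃ j', j = j' + 1 := ⟨j - 1, by omega⟩
  have hx : 0 < 5 ^ (i' + j') := by positivity
  have e1 : i' + 1 - 1 + (j' + 1) = i' + j' + 1 := by omega
  have e2 : i' + 1 + (j' + 1 - 1) = i' + j' + 1 := by omega
  rw [e1] at h1; rw [e2] at h2
  have h3 : (5 : Nat) ^ (i' + j' + 1) = 5 * 5 ^ (i' + j') := by ring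
  rw [h3] at h1 h2
  simp only [mgapMu, List.map_append, List.sum_append, List.map_cons, List.sum_cons, mgapFw]
  have h4 : i' + 1 + (j' + 1) = i' + j' + 2 := by omega
  rw [h4]
  have h5 : (5 : Nat) ^ (i' + j' + 2) = 25 * 5 ^ (i' + j') := by ring
  rw [h5]
  simp only [mgapMu] at h1 h2
  omega

-- port of B's while loop (head of the list = top of Python's stack).
-- In the 'expanded' branches Python indexes memo directly (the entries are always
-- present there, proved below); getD 0 is used for totality and is exact on every
-- reachable state.
def mgapRun (s1 s2 : List Char) :
    List (Nat × Nat × Bool) → PySem.Dict (Nat × Nat) Int → PySem.Dict (Nat × Nat) Int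
  | [], memo => memo
  | (i, j, expanded) :: st, memo =>
    if (memo.get? (i, j)).isSome then mgapRun s1 s2 st memo
    else if i = 0 ∨ j = 0 then mgapRun s1 s2 st (memo.insert (i, j) 0)
    else if s1.getD (i - 1) ' ' = s2.getD (j - 1) ' ' then
      if expanded then
        mgapRun s1 s2 st (memo.insert (i, j) ((memo.get? (i - 1, j - 1)).getD 0 + 1))
      else
        match memo.get? (i - 1, j - 1) with
        | some d => mgapRun s1 s2 st (memo.insert (i, j) (d + 1))
        | none => mgapRun s1 s2 ((i - 1, j - 1, false) :: (i, j, true) :: st) memo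
    else if expanded then
      let a := (memo.get? (i - 1, j)).getD 0
      let b := (memo.get? (i, j - 1)).getD 0
      mgapRun s1 s2 st (memo.insert (i, j) (if a ≥ b then a else b))
    else
      match memo.get? (i - 1, j), memo.get? (i, j - 1) with
      | some a, some b => mgapRun s1 s2 st (memo.insert (i, j) (if a ≥ b then a else b))
      | oa, ob =>
          mgapRun s1 s2
            ((if oa = none then [(i - 1, j, false)] else []) ++
             (if ob = none then [(i, j - 1, false)] else []) ++ (i, j, true) :: st) memo
termination_by st _ => mgapMu st
decreasing_by
  all_goals try exact mgapMu_lt_pop _ _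
  · have hij : ¬(i = 0 ∨ j = 0) := by assumption
    have hexp : ¬expanded = true := by assumption
    simp only [Bool.not_eq_true] at hexp
    subst hexp
    exact mgapMu_lt_push1 i j (by tauto) (by tauto) st
  · have hij : ¬(i = 0 ∨ j = 0) := by assumption
    have hexp : ¬expanded = true := by assumption
    simp only [Bool.not_eq_true] at hexp
    subst hexp
    refine mgapMu_lt_push2 i j (by tauto) (by tauto) _ _ ?_ ?_ st <;>
      (split <;> simp [mgapMu, mgapFw])

def max_gap_symbols_alt (str1 : String) (str2 : String) : Int :=
  let t1 := str1.toList
  let t2 := str2.toList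
  let memo := mgapRun t1 t2 [(t1.length, t2.length, false)] PySem.Dict.empty
  (t1.length : Int) + (t2.length : Int) - 2 * ((memo.get? (t1.length, t2.length)).getD 0)

-- ===== PRECONDITION & SPEC =====
def Spec_max_gap_symbols (str1 : String) (str2 : String) (out : Int) : Prop := out = max_gap_symbols_alt str1 str2
instance (str1 : String) (str2 : String) (out : Int) : Decidable (Spec_max_gap_symbols str1 str2 out) := by unfold Spec_max_gap_symbols; infer_instance

-- ===== CLAIM (what is proved, stated in full; the proofs are below) =====
def Claim_equal_max_gap_symbols : Prop := ∀ (str1 : String) (str2 : String), Dom_max_gap_symbols str1 str2 → Spec_max_gap_symbols str1 str2 (max_gap_symbols str1 str2)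

-- ===== LEMMAS AND PROOFS =====

-- The pure LCS-length recurrence both programs compute (proof-side reference function).
def mgapL (s1 s2 : List Char) : Nat → Nat → Int
  | 0, _ => 0
  | _ + 1, 0 => 0
  | i + 1, j + 1 =>
    if s1.getD i ' ' = s2.getD j ' ' then mgapL s1 s2 i j + 1
    else max (mgapL s1 s2 (i + 1) j) (mgapL s1 s2 i (j + 1))
termination_by i j => i + j

theorem mgapL_zero (s1 s2 : List Char) (i j : Nat) (h : i = 0 ∨ j = 0) :
    mgapL s1 s2 i j = 0 := by
  rcases h with rfl | rfl
  · rw [mgapL]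
  · cases i with
    | zero => rw [mgapL]
    | succ i => rw [mgapL]

theorem mgapL_succ (s1 s2 : List Char) (i j : Nat) :
    mgapL s1 s2 (i + 1) (j + 1) =
      if s1.getD i ' ' = s2.getD j ' ' then mgapL s1 s2 i j + 1
      else max (mgapL s1 s2 (i + 1) j) (mgapL s1 s2 i (j + 1)) := by
  rw [mgapL]

-- ---- B-side correctness: the stack machine fills the memo with mgapL values ----

theorem mgapL_match (s1 s2 : List Char) (i j : Nat) (hi : i ≠ 0) (hj : j ≠ 0)
    (hc : s1.getD (i - 1) ' ' = s2.getD (j - 1) ' ') :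
    mgapL s1 s2 i j = mgapL s1 s2 (i - 1) (j - 1) + 1 := by
  obtain ⟨i', rfl⟩ : ∃ i', i = i' + 1 := ⟨i - 1, by omega⟩
  obtain ⟨j', rfl⟩ : ∃ j', j = j' + 1 := ⟨j - 1, by omega⟩
  simp only [Nat.add_sub_cancel] at hc ⊢
  rw [mgapL_succ, if_pos hc]

theorem mgapL_else (s1 s2 : List Char) (i j : Nat) (hi : i ≠ 0) (hj : j ≠ 0)
    (hc : ¬s1.getD (i - 1) ' ' = s2.getD (j - 1) ' ') :
    mgapL s1 s2 i j = max (mgapL s1 s2 i (j - 1)) (mgapL s1 s2 (i - 1) j) := by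
  obtain ⟨i', rfl⟩ : ∃ i', i = i' + 1 := ⟨i - 1, by omega⟩
  obtain ⟨j', rfl⟩ : ∃ j', j = j' + 1 := ⟨j - 1, by omega⟩
  simp only [Nat.add_sub_cancel] at hc ⊢
  rw [mgapL_succ, if_neg hc]

theorem ifge_eq_max (a b : Int) : (if a ≥ b then a else b) = max b a := by
  by_cases h : b ≤ a
  · rw [if_pos h, max_eq_right h]
  · rw [if_neg h, max_eq_left (by omega)]

def MemoOK (s1 s2 : List Char) (memo : PySem.Dict (Nat × Nat) Int) : Prop :=
  ∀ i j v, memo.get? (i, j) = some v → v = mgapL s1 s2 i j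

theorem memoOK_empty (s1 s2 : List Char) : MemoOK s1 s2 PySem.Dict.empty := by
  intro i j v h
  rw [PySem.Dict.get?_empty] at h
  exact absurd h (by simp)

theorem memoOK_insert {s1 s2 : List Char} {memo : PySem.Dict (Nat × Nat) Int}
    {i j : Nat} {v : Int} (h : MemoOK s1 s2 memo) (hv : v = mgapL s1 s2 i j) :
    MemoOK s1 s2 (memo.insert (i, j) v) := by
  intro i' j' v' hg
  rw [PySem.Dict.get?_insert] at hg
  split at hg
  · rename_i hp
    obtain ⟨rfl, rfl⟩ : i' = i ∧ j' = j :=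
      ⟨congrArg Prod.fst hp, congrArg Prod.snd hp⟩
    rw [← Option.some_inj.mp hg]; exact hv
  · exact h i' j' v' hg

theorem get?_insert_keep {memo : PySem.Dict (Nat × Nat) Int} {k p : Nat × Nat} {w v : Int}
    (habs : ¬(memo.get? k).isSome = true) (hget : memo.get? p = some v) :
    (memo.insert k w).get? p = some v := by
  rw [PySem.Dict.get?_insert]
  split
  · rename_i hp
    subst hp
    rw [hget] at habs
    exact absurd rfl habs
  · exact hget

-- ---- step (one-iteration) equations for mgapRun ----

theorem step_nil (s1 s2 : List Char) (memo : PySem.Dict (Nat × Nat) Int) :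
    mgapRun s1 s2 [] memo = memo := by rw [mgapRun]

theorem step_hit (s1 s2 : List Char) (i j : Nat) (exp : Bool) (st : List (Nat × Nat × Bool))
    (memo : PySem.Dict (Nat × Nat) Int) (h : (memo.get? (i, j)).isSome = true) :
    mgapRun s1 s2 ((i, j, exp) :: st) memo = mgapRun s1 s2 st memo := by
  rw [mgapRun]; rw [if_pos h]

theorem step_base (s1 s2 : List Char) (i j : Nat) (exp : Bool) (st : List (Nat × Nat × Bool))
    (memo : PySem.Dict (Nat × Nat) Int) (h : ¬(memo.get? (i, j)).isSome = true)
    (hz : i = 0 ∨ j = 0) :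
    mgapRun s1 s2 ((i, j, exp) :: st) memo = mgapRun s1 s2 st (memo.insert (i, j) 0) := by
  rw [mgapRun]; rw [if_neg h, if_pos hz]

theorem step_mtrue (s1 s2 : List Char) (i j : Nat) (st : List (Nat × Nat × Bool))
    (memo : PySem.Dict (Nat × Nat) Int) (h : ¬(memo.get? (i, j)).isSome = true)
    (hz : ¬(i = 0 ∨ j = 0)) (hc : s1.getD (i - 1) ' ' = s2.getD (j - 1) ' ') :
    mgapRun s1 s2 ((i, j, true) :: st) memo
      = mgapRun s1 s2 st (memo.insert (i, j) ((memo.get? (i - 1, j - 1)).getD 0 + 1)) := by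
  rw [mgapRun]; rw [if_neg h, if_neg hz, if_pos hc, if_pos rfl]

theorem step_msome (s1 s2 : List Char) (i j : Nat) (st : List (Nat × Nat × Bool))
    (memo : PySem.Dict (Nat × Nat) Int) (d : Int) (h : ¬(memo.get? (i, j)).isSome = true)
    (hz : ¬(i = 0 ∨ j = 0)) (hc : s1.getD (i - 1) ' ' = s2.getD (j - 1) ' ')
    (hd : memo.get? (i - 1, j - 1) = some d) :
    mgapRun s1 s2 ((i, j, false) :: st) memo = mgapRun s1 s2 st (memo.insert (i, j) (d + 1)) := by
  rw [mgapRun]; rw [if_neg h, if_neg hz, if_pos hc]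
  simp only [Bool.false_eq_true, if_false, hd]

theorem step_mnone (s1 s2 : List Char) (i j : Nat) (st : List (Nat × Nat × Bool))
    (memo : PySem.Dict (Nat × Nat) Int) (h : ¬(memo.get? (i, j)).isSome = true)
    (hz : ¬(i = 0 ∨ j = 0)) (hc : s1.getD (i - 1) ' ' = s2.getD (j - 1) ' ')
    (hd : memo.get? (i - 1, j - 1) = none) :
    mgapRun s1 s2 ((i, j, false) :: st) memo
      = mgapRun s1 s2 ((i - 1, j - 1, false) :: (i, j, true) :: st) memo := by
  rw [mgapRun]; rw [if_neg h, if_neg hz, if_pos hc]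
  simp only [Bool.false_eq_true, if_false, hd]

theorem step_etrue (s1 s2 : List Char) (i j : Nat) (st : List (Nat × Nat × Bool))
    (memo : PySem.Dict (Nat × Nat) Int) (h : ¬(memo.get? (i, j)).isSome = true)
    (hz : ¬(i = 0 ∨ j = 0)) (hc : ¬s1.getD (i - 1) ' ' = s2.getD (j - 1) ' ') :
    mgapRun s1 s2 ((i, j, true) :: st) memo
      = mgapRun s1 s2 st (memo.insert (i, j)
          (if (memo.get? (i - 1, j)).getD 0 ≥ (memo.get? (i, j - 1)).getD 0
           then (memo.get? (i - 1, j)).getD 0 else (memo.get? (i, j - 1)).getD 0)) := by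
  rw [mgapRun]; rw [if_neg h, if_neg hz, if_neg hc, if_pos rfl]

theorem step_esome (s1 s2 : List Char) (i j : Nat) (st : List (Nat × Nat × Bool))
    (memo : PySem.Dict (Nat × Nat) Int) (a b : Int) (h : ¬(memo.get? (i, j)).isSome = true)
    (hz : ¬(i = 0 ∨ j = 0)) (hc : ¬s1.getD (i - 1) ' ' = s2.getD (j - 1) ' ')
    (ha : memo.get? (i - 1, j) = some a) (hb : memo.get? (i, j - 1) = some b) :
    mgapRun s1 s2 ((i, j, false) :: st) memo
      = mgapRun s1 s2 st (memo.insert (i, j) (if a ≥ b then a else b)) := by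
  rw [mgapRun]; rw [if_neg h, if_neg hz, if_neg hc]
  simp only [Bool.false_eq_true, if_false, ha, hb]

theorem step_epush (s1 s2 : List Char) (i j : Nat) (st : List (Nat × Nat × Bool))
    (memo : PySem.Dict (Nat × Nat) Int) (h : ¬(memo.get? (i, j)).isSome = true)
    (hz : ¬(i = 0 ∨ j = 0)) (hc : ¬s1.getD (i - 1) ' ' = s2.getD (j - 1) ' ')
    (hne : memo.get? (i - 1, j) = none ∨ memo.get? (i, j - 1) = none) :
    mgapRun s1 s2 ((i, j, false) :: st) memo
      = mgapRun s1 s2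
          ((if memo.get? (i - 1, j) = none then [(i - 1, j, false)] else []) ++
           (if memo.get? (i, j - 1) = none then [(i, j - 1, false)] else []) ++
           (i, j, true) :: st) memo := by
  rw [mgapRun]; rw [if_neg h, if_neg hz, if_neg hc]
  simp only [Bool.false_eq_true, if_false]
  rcases hoa : memo.get? (i - 1, j) with _ | a <;> rcases hob : memo.get? (i, j - 1) with _ | b <;>
    simp_all

-- existing memo entries are never overwritten
theorem mgapRun_mono (s1 s2 : List Char) :
    ∀ st memo, ∀ p v, memo.get? p = some v → (mgapRun s1 s2 st memo).get? p = some v := by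
  intro st memo
  induction st, memo using mgapRun.induct s1 s2 with
  | case1 memo =>
      intro p v h; rwa [step_nil]
  | case2 i j exp st memo hhit ih =>
      intro p v h; rw [step_hit s1 s2 i j exp st memo hhit]; exact ih p v h
  | case3 i j exp st memo hhit hz ih =>
      intro p v h; rw [step_base s1 s2 i j exp st memo hhit hz]
      exact ih p v (get?_insert_keep hhit h)
  | case4 i j st memo hhit hz hc ih =>
      intro p v h; rw [step_mtrue s1 s2 i j st memo hhit hz hc]
      exact ih p v (get?_insert_keep hhit h)
  | case5 i j exp st memo hhit hz hc hexp d hd ih =>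
      intro p v h
      have hexp' : exp = false := by simpa using hexp
      subst hexp'
      rw [step_msome s1 s2 i j st memo d hhit hz hc hd]
      exact ih p v (get?_insert_keep hhit h)
  | case6 i j exp st memo hhit hz hc hexp hd ih =>
      intro p v h
      have hexp' : exp = false := by simpa using hexp
      subst hexp'
      rw [step_mnone s1 s2 i j st memo hhit hz hc hd]
      exact ih p v h
  | case7 i j st memo hhit hz hc a b ih =>
      intro p v h; rw [step_etrue s1 s2 i j st memo hhit hz hc]
      simp only [dite_eq_ite] at ih
      exact ih p v (get?_insert_keep hhit h)
  | case8 i j exp st memo hhit hz hc hexp a b hb ha ih =>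
      intro p v h
      have hexp' : exp = false := by simpa using hexp
      subst hexp'
      rw [step_esome s1 s2 i j st memo a b hhit hz hc ha hb]
      simp only [dite_eq_ite] at ih
      exact ih p v (get?_insert_keep hhit h)
  | case9 i j exp st memo hhit hz hc hexp hns ih =>
      intro p v h
      have hexp' : exp = false := by simpa using hexp
      subst hexp'
      have hne : memo.get? (i - 1, j) = none ∨ memo.get? (i, j - 1) = none := by
        rcases hoa : memo.get? (i - 1, j) with _ | a
        · exact Or.inl rfl
        · rcases hob : memo.get? (i, j - 1) with _ | b
          · exact Or.inr rfl
          · exact absurd (hns a b hoa hob) (by simp)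
      rw [step_epush s1 s2 i j st memo hhit hz hc hne]
      simp only [dite_eq_ite] at ih
      exact ih p v h

theorem mgapRun_append (s1 s2 : List Char) :
    ∀ st1 memo st2, mgapRun s1 s2 (st1 ++ st2) memo
      = mgapRun s1 s2 st2 (mgapRun s1 s2 st1 memo) := by
  intro st1 memo
  induction st1, memo using mgapRun.induct s1 s2 with
  | case1 memo =>
      intro st2; rw [List.nil_append, step_nil]
  | case2 i j exp st memo hhit ih =>
      intro st2
      rw [List.cons_append, step_hit s1 s2 i j exp (st ++ st2) memo hhit,
        step_hit s1 s2 i j exp st memo hhit, ih st2]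
  | case3 i j exp st memo hhit hz ih =>
      intro st2
      rw [List.cons_append, step_base s1 s2 i j exp (st ++ st2) memo hhit hz,
        step_base s1 s2 i j exp st memo hhit hz, ih st2]
  | case4 i j st memo hhit hz hc ih =>
      intro st2
      rw [List.cons_append, step_mtrue s1 s2 i j (st ++ st2) memo hhit hz hc,
        step_mtrue s1 s2 i j st memo hhit hz hc, ih st2]
  | case5 i j exp st memo hhit hz hc hexp d hd ih =>
      intro st2
      have hexp' : exp = false := by simpa using hexp
      subst hexp'
      rw [List.cons_append, step_msome s1 s2 i j (st ++ st2) memo d hhit hz hc hd,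
        step_msome s1 s2 i j st memo d hhit hz hc hd, ih st2]
  | case6 i j exp st memo hhit hz hc hexp hd ih =>
      intro st2
      have hexp' : exp = false := by simpa using hexp
      subst hexp'
      rw [List.cons_append, step_mnone s1 s2 i j (st ++ st2) memo hhit hz hc hd,
        step_mnone s1 s2 i j st memo hhit hz hc hd]
      exact ih st2
  | case7 i j st memo hhit hz hc a b ih =>
      intro st2
      simp only [dite_eq_ite] at ih
      rw [List.cons_append, step_etrue s1 s2 i j (st ++ st2) memo hhit hz hc,
        step_etrue s1 s2 i j st memo hhit hz hc, ih st2]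
  | case8 i j exp st memo hhit hz hc hexp a b hb ha ih =>
      intro st2
      have hexp' : exp = false := by simpa using hexp
      subst hexp'
      simp only [dite_eq_ite] at ih
      rw [List.cons_append, step_esome s1 s2 i j (st ++ st2) memo a b hhit hz hc ha hb,
        step_esome s1 s2 i j st memo a b hhit hz hc ha hb, ih st2]
  | case9 i j exp st memo hhit hz hc hexp hns ih =>
      intro st2
      have hexp' : exp = false := by simpa using hexp
      subst hexp'
      have hne : memo.get? (i - 1, j) = none ∨ memo.get? (i, j - 1) = none := by
        rcases hoa : memo.get? (i - 1, j) with _ | a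
        · exact Or.inl rfl
        · rcases hob : memo.get? (i, j - 1) with _ | b
          · exact Or.inr rfl
          · exact absurd (hns a b hoa hob) (by simp)
      rw [List.cons_append, step_epush s1 s2 i j (st ++ st2) memo hhit hz hc hne,
        step_epush s1 s2 i j st memo hhit hz hc hne]
      simp only [dite_eq_ite] at ih
      have hassoc :
          ((if memo.get? (i - 1, j) = none then [(i - 1, j, false)] else []) ++
             (if memo.get? (i, j - 1) = none then [(i, j - 1, false)] else []) ++
             (i, j, true) :: (st ++ st2))
            = (((if memo.get? (i - 1, j) = none then [(i - 1, j, false)] else []) ++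
                (if memo.get? (i, j - 1) = none then [(i, j - 1, false)] else []) ++
                (i, j, true) :: st) ++ st2) := by
        simp [List.append_assoc]
      rw [hassoc]
      exact ih st2

-- the true-frame finishing steps
theorem true_step_match (s1 s2 : List Char) (i j : Nat) (hz : ¬(i = 0 ∨ j = 0))
    (hc : s1.getD (i - 1) ' ' = s2.getD (j - 1) ' ')
    (memo : PySem.Dict (Nat × Nat) Int) (hOK : MemoOK s1 s2 memo)
    (hch : memo.get? (i - 1, j - 1) = some (mgapL s1 s2 (i - 1) (j - 1))) :
    MemoOK s1 s2 (mgapRun s1 s2 [(i, j, true)] memo) ∧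
    (mgapRun s1 s2 [(i, j, true)] memo).get? (i, j) = some (mgapL s1 s2 i j) := by
  by_cases hhit : (memo.get? (i, j)).isSome = true
  · rw [step_hit s1 s2 i j true [] memo hhit, step_nil]
    obtain ⟨v, hv⟩ := Option.isSome_iff_exists.mp hhit
    exact ⟨hOK, by rw [hv, hOK i j v hv]⟩
  · rw [step_mtrue s1 s2 i j [] memo hhit hz hc, step_nil]
    have hval : (memo.get? (i - 1, j - 1)).getD 0 + 1 = mgapL s1 s2 i j := by
      rw [hch, Option.getD_some,
        mgapL_match s1 s2 i j (by tauto) (by tauto) hc]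
    exact ⟨memoOK_insert hOK hval,
      by rw [PySem.Dict.get?_insert_self, hval]⟩

theorem true_step_else (s1 s2 : List Char) (i j : Nat) (hz : ¬(i = 0 ∨ j = 0))
    (hc : ¬s1.getD (i - 1) ' ' = s2.getD (j - 1) ' ')
    (memo : PySem.Dict (Nat × Nat) Int) (hOK : MemoOK s1 s2 memo)
    (hA : memo.get? (i - 1, j) = some (mgapL s1 s2 (i - 1) j))
    (hB : memo.get? (i, j - 1) = some (mgapL s1 s2 i (j - 1))) :
    MemoOK s1 s2 (mgapRun s1 s2 [(i, j, true)] memo) ∧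
    (mgapRun s1 s2 [(i, j, true)] memo).get? (i, j) = some (mgapL s1 s2 i j) := by
  by_cases hhit : (memo.get? (i, j)).isSome = true
  · rw [step_hit s1 s2 i j true [] memo hhit, step_nil]
    obtain ⟨v, hv⟩ := Option.isSome_iff_exists.mp hhit
    exact ⟨hOK, by rw [hv, hOK i j v hv]⟩
  · rw [step_etrue s1 s2 i j [] memo hhit hz hc, step_nil]
    have hval : (if (memo.get? (i - 1, j)).getD 0 ≥ (memo.get? (i, j - 1)).getD 0
           then (memo.get? (i - 1, j)).getD 0 else (memo.get? (i, j - 1)).getD 0)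
        = mgapL s1 s2 i j := by
      rw [hA, hB, Option.getD_some, Option.getD_some, ifge_eq_max,
        mgapL_else s1 s2 i j (by tauto) (by tauto) hc]
    exact ⟨memoOK_insert hOK hval,
      by rw [PySem.Dict.get?_insert_self, hval]⟩

-- a single unexpanded frame ends with its own pair memoized correctly
theorem mgapRun_single (s1 s2 : List Char) :
    ∀ (N i j : Nat), i + j < N → ∀ memo, MemoOK s1 s2 memo →
      MemoOK s1 s2 (mgapRun s1 s2 [(i, j, false)] memo) ∧
      (mgapRun s1 s2 [(i, j, false)] memo).get? (i, j) = some (mgapL s1 s2 i j) := by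
  intro N
  induction N with
  | zero => intro i j h; exact absurd h (Nat.not_lt_zero _)
  | succ N ih =>
    intro i j hN memo hOK
    by_cases hhit : (memo.get? (i, j)).isSome = true
    · rw [step_hit s1 s2 i j false [] memo hhit, step_nil]
      obtain ⟨v, hv⟩ := Option.isSome_iff_exists.mp hhit
      exact ⟨hOK, by rw [hv, hOK i j v hv]⟩
    · by_cases hz : i = 0 ∨ j = 0
      · rw [step_base s1 s2 i j false [] memo hhit hz, step_nil]
        refine ⟨memoOK_insert hOK (mgapL_zero s1 s2 i j hz).symm, ?_⟩
        rw [PySem.Dict.get?_insert_self, mgapL_zero s1 s2 i j hz]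
      · have hi : i ≠ 0 := by tauto
        have hj : j ≠ 0 := by tauto
        by_cases hc : s1.getD (i - 1) ' ' = s2.getD (j - 1) ' '
        · -- matching characters
          rcases hd : memo.get? (i - 1, j - 1) with _ | d
          · -- child not memoized yet: push
            rw [step_mnone s1 s2 i j [] memo hhit hz hc hd]
            have hsplit : ((i - 1, j - 1, false) :: (i, j, true) :: ([] : List (Nat × Nat × Bool)))
                = [(i - 1, j - 1, false)] ++ [(i, j, true)] := rfl
            rw [hsplit, mgapRun_append]
            obtain ⟨hOK1, hch⟩ := ih (i - 1) (j - 1) (by omega) memo hOK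
            exact true_step_match s1 s2 i j hz hc _ hOK1 hch
          · rw [step_msome s1 s2 i j [] memo d hhit hz hc hd, step_nil]
            have hval : d + 1 = mgapL s1 s2 i j := by
              rw [hOK _ _ _ hd, mgapL_match s1 s2 i j hi hj hc]
            exact ⟨memoOK_insert hOK hval,
              by rw [PySem.Dict.get?_insert_self, hval]⟩
        · -- non-matching characters
          rcases hoa : memo.get? (i - 1, j) with _ | a <;>
            rcases hob : memo.get? (i, j - 1) with _ | b
          · -- both children missing
            rw [step_epush s1 s2 i j [] memo hhit hz hc (Or.inl hoa), if_pos hoa, if_pos hob,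
              mgapRun_append, mgapRun_append]
            obtain ⟨hOK1, hA1⟩ := ih (i - 1) j (by omega) memo hOK
            obtain ⟨hOK2, hB2⟩ := ih i (j - 1) (by omega) _ hOK1
            have hA2 := mgapRun_mono s1 s2 [(i, j - 1, false)] _ _ _ hA1
            exact true_step_else s1 s2 i j hz hc _ hOK2 hA2 hB2
          · -- only (i-1, j) missing
            rw [step_epush s1 s2 i j [] memo hhit hz hc (Or.inl hoa), if_pos hoa,
              if_neg (by rw [hob]; simp), mgapRun_append, mgapRun_append, step_nil]
            obtain ⟨hOK1, hA1⟩ := ih (i - 1) j (by omega) memo hOK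
            have hB1 : (mgapRun s1 s2 [(i - 1, j, false)] memo).get? (i, j - 1)
                = some (mgapL s1 s2 i (j - 1)) := by
              have := mgapRun_mono s1 s2 [(i - 1, j, false)] memo _ _ hob
              rw [this, hOK1 _ _ _ this]
            exact true_step_else s1 s2 i j hz hc _ hOK1 hA1 hB1
          · -- only (i, j-1) missing
            rw [step_epush s1 s2 i j [] memo hhit hz hc (Or.inr hob),
              if_neg (by rw [hoa]; simp), if_pos hob, List.nil_append,
              mgapRun_append]
            obtain ⟨hOK2, hB2⟩ := ih i (j - 1) (by omega) memo hOK
            have hA2 : (mgapRun s1 s2 [(i, j - 1, false)] memo).get? (i - 1, j)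
                = some (mgapL s1 s2 (i - 1) j) := by
              have := mgapRun_mono s1 s2 [(i, j - 1, false)] memo _ _ hoa
              rw [this, hOK2 _ _ _ this]
            exact true_step_else s1 s2 i j hz hc _ hOK2 hA2 hB2
          · -- both children memoized: compute directly
            rw [step_esome s1 s2 i j [] memo a b hhit hz hc hoa hob, step_nil]
            have hval : (if a ≥ b then a else b) = mgapL s1 s2 i j := by
              rw [hOK _ _ _ hoa, hOK _ _ _ hob, ifge_eq_max,
                mgapL_else s1 s2 i j hi hj hc]
            exact ⟨memoOK_insert hOK hval,
              by rw [PySem.Dict.get?_insert_self, hval]⟩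

-- B's top level computes the recurrence value
theorem alt_eq_L (str1 str2 : String) :
    max_gap_symbols_alt str1 str2
      = (str1.toList.length : Int) + (str2.toList.length : Int)
        - 2 * mgapL str1.toList str2.toList str1.toList.length str2.toList.length := by
  obtain ⟨-, hget⟩ := mgapRun_single str1.toList str2.toList
    (str1.toList.length + str2.toList.length + 1) str1.toList.length str2.toList.length
    (by omega) PySem.Dict.empty (memoOK_empty _ _)
  rw [show max_gap_symbols_alt str1 str2
      = ((str1.toList.length : Int) + (str2.toList.length : Int)
          - 2 * ((mgapRun str1.toList str2.toList
              [(str1.toList.length, str2.toList.length, false)] PySem.Dict.empty).get?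
                (str1.toList.length, str2.toList.length)).getD 0) from rfl]
  rw [hget, Option.getD_some]

-- ---- A-side: the table fold computes the rows of mgapL (machinery reused) ----

-- cur is built left to right: prev.headD 0 = prev[j], prev.tail.headD 0 = prev[j+1], curj = cur[j].
def mgapRowAux (c : Char) : List Char → List Int → Int → List Int
  | [], _, _ => []
  | d :: ds, prev, curj =>
    let v : Int := if c = d then prev.headD 0 + 1 else max curj (prev.tail.headD 0)
    v :: mgapRowAux c ds prev.tail v

def mgapRow (c : Char) (s2 : List Char) (prev : List Int) : List Int :=
  0 :: mgapRowAux c s2 prev 0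

def mgapRows : List Char → List Char → List Int → List Int
  | [], _, prev => prev
  | c :: cs, s2, prev => mgapRows cs s2 (mgapRow c s2 prev)

theorem mgapRowAux_length (c : Char) (ds : List Char) : ∀ prev curj, (mgapRowAux c ds prev curj).length = ds.length := by
  induction ds with
  | nil => intro prev curj; rfl
  | cons d ds ih => intro prev curj; simp [mgapRowAux, ih]

theorem set_getD_self (mat : List (List Int)) (i : Nat) (hi : i < mat.length) :
    mat.set i (mat.getD i []) = mat := by
  have : mat.getD i [] = mat[i] := by simp [List.getD, List.getElem?_eq_getElem hi]
  rw [this, List.set_getElem_self]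

theorem getD_set_self (mat : List (List Int)) (i : Nat) (r : List Int) (hi : i < mat.length) :
    (mat.set i r).getD i [] = r := by
  simp [List.getD, List.getElem?_set_eq_of_lt r hi]

theorem getD_set_ne (mat : List (List Int)) (i k : Nat) (r : List Int) (h : i ≠ k) :
    (mat.set i r).getD k [] = mat.getD k [] := by
  simp [List.getD, List.getElem?_set_ne h]

-- A's inner loop, started at column j0 = done.length with row i0 built up to done,
-- rewrites row i0 to done ++ mgapRowAux … and leaves every other row alone.
theorem inner_loop (s1 t2 : List Char) (i0 : Nat) (hi : 1 ≤ i0) :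
    ∀ (ds : List Char) (j0 : Nat) (mat : List (List Int)) (done prevfull : List Int) (curj : Int),
    1 ≤ j0 →
    i0 < mat.length →
    t2.drop (j0 - 1) = ds →
    mat.getD (i0 - 1) [] = prevfull →
    mat.getD i0 [] = done ++ List.replicate ds.length 0 →
    done.length = j0 →
    done.getD (j0 - 1) 0 = curj →
    (PySem.List.pyRange (j0 : Int) ((j0 : Int) + (ds.length : Int)) 1).foldl
        (mgapInnerStep s1 ('-' :: t2) (i0 : Int)) mat
      = mat.set i0 (done ++ mgapRowAux (s1.getD i0 '-') ds (prevfull.drop (j0 - 1)) curj) := by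
  intro ds
  induction ds with
  | nil =>
      intro j0 mat done prevfull curj hj hilen hds hprev hrow hdlen hlast
      rw [PySem.List.pyRange_one_eq_nil (by simp)]
      simp only [List.foldl_nil, mgapRowAux, List.append_nil]
      simp only [List.length_nil, List.replicate_zero, List.append_nil] at hrow
      rw [← hrow, set_getD_self mat i0 hilen]
  | cons d ds ih =>
      intro j0 mat done prevfull curj hj hilen hds hprev hrow hdlen hlast
      have hcons : PySem.List.pyRange (j0 : Int) ((j0 : Int) + ((d :: ds).length : Int)) 1
          = (j0 : Int) :: PySem.List.pyRange ((j0 : Int) + 1) ((j0 : Int) + ((d :: ds).length : Int)) 1 := by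
        apply PySem.List.pyRange_one_cons
        have : (0 : Int) < ((d :: ds).length : Int) := by

          simp
        omega
      rw [hcons]
      simp only [List.foldl_cons]
      -- evaluate the step at j = j0
      have hj0nat : ((j0 : Int)).toNat = j0 := by omega
      have hj1nat : ((j0 : Int) - 1).toNat = j0 - 1 := by omega
      have hi0nat : ((i0 : Int)).toNat = i0 := by omega
      have hi1nat : ((i0 : Int) - 1).toNat = i0 - 1 := by omega
      -- character compared at this position
      have ht2 : t2[j0 - 1]? = some d := by
        rw [← List.head?_drop, hds]; rfl
      have hchar : ('-' :: t2).getD ((j0 : Int)).toNat '-' = d := by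
        rw [hj0nat]
        have : j0 = (j0 - 1) + 1 := by omega
        rw [this]
        simp [List.getD, ht2]
      -- row i0 entry at j0 - 1 is curj
      have hcur : (mat.getD i0 []).getD (j0 - 1) 0 = curj := by
        rw [hrow, ← hlast]
        have hlt : j0 - 1 < done.length := by omega
        simp [List.getD, List.getElem?_append_left hlt]
      -- prev entries
      have hpd : prevfull.getD (j0 - 1) 0 = (prevfull.drop (j0 - 1)).headD 0 := by
        simp [List.getD, ← List.head?_drop, List.headD_eq_head?_getD]
      have hpd1 : prevfull.getD j0 0 = (prevfull.drop (j0 - 1)).tail.headD 0 := by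
        have : (prevfull.drop (j0 - 1)).tail = prevfull.drop j0 := by
          rw [List.tail_drop]
          congr 1
          omega
        rw [this]
        simp [List.getD, ← List.head?_drop, List.headD_eq_head?_getD]
      -- the value written at this step
      obtain ⟨V, hV⟩ : ∃ V : Int,
          (if s1.getD i0 '-' = d then (prevfull.drop (j0 - 1)).headD 0 + 1
           else max curj ((prevfull.drop (j0 - 1)).tail.headD 0)) = V := ⟨_, rfl⟩
      have hstep : mgapInnerStep s1 ('-' :: t2) (i0 : Int) mat (j0 : Int)
          = mat.set i0 ((done ++ [V]) ++ List.replicate ds.length 0) := by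
        unfold mgapInnerStep
        simp only [hi0nat, hi1nat, hj1nat, hj0nat, hprev, hcur]
        congr 1
        rw [hrow]
        have : List.replicate (d :: ds).length (0 : Int) = 0 :: List.replicate ds.length 0 := by
          simp [List.replicate_succ]
        rw [this, ← hdlen, List.set_append_right _ _ (Nat.le_refl done.length)]
        simp only [Nat.sub_self, List.set_cons_zero, List.append_assoc, List.singleton_append]
        rw [hj0nat] at hchar
        rw [hdlen, hchar, hpd, hpd1, hV]
      rw [hstep]
      have hr1 : (j0 : Int) + 1 = ((j0 + 1 : Nat) : Int) := by push_cast; ring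
      have hr2 : (j0 : Int) + ((d :: ds).length : Int) = ((j0 + 1 : Nat) : Int) + (ds.length : Int) := by
        simp; ring
      rw [hr1, hr2]
      have hjj : (j0 + 1) - 1 = (j0 - 1) + 1 := by omega
      have hdrop' : t2.drop ((j0 + 1) - 1) = ds := by
        rw [hjj, ← List.tail_drop, hds]; rfl
      have hilen' : i0 < (mat.set i0 ((done ++ [V]) ++ List.replicate ds.length 0)).length := by
        simpa using hilen
      have hrec := ih (j0 + 1) (mat.set i0 ((done ++ [V]) ++ List.replicate ds.length 0))
        (done ++ [V]) prevfull V (by omega) hilen' hdrop'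
        (by rw [getD_set_ne _ _ _ _ (by omega)]; exact hprev)
        (getD_set_self _ _ _ hilen)
        (by simp [hdlen])
        (by have h1 : (j0 + 1) - 1 = done.length := by omega
            rw [h1]
            simp [List.getD])
      rw [hrec, List.set_set]
      congr 1
      have hptail : prevfull.drop ((j0 + 1) - 1) = (prevfull.drop (j0 - 1)).tail := by
        rw [hjj, ← List.tail_drop]
      rw [hptail]
      have hunf : mgapRowAux (s1.getD i0 '-') (d :: ds) (List.drop (j0 - 1) prevfull) curj
          = (if s1.getD i0 '-' = d then (List.drop (j0 - 1) prevfull).headD 0 + 1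
             else max curj ((List.drop (j0 - 1) prevfull).tail.headD 0))
            :: mgapRowAux (s1.getD i0 '-') ds (List.drop (j0 - 1) prevfull).tail
              (if s1.getD i0 '-' = d then (List.drop (j0 - 1) prevfull).headD 0 + 1
               else max curj ((List.drop (j0 - 1) prevfull).tail.headD 0)) := rfl
      rw [hV] at hunf
      rw [hunf]
      simp

-- A's outer loop computes, in its last row, exactly the iterated rows.
theorem outer_loop (t1 t2 : List Char) :
    ∀ (cs : List Char) (i0 : Nat) (mat : List (List Int)) (prev : List Int),
    1 ≤ i0 →
    mat.length = i0 + cs.length →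
    t1.drop (i0 - 1) = cs →
    prev.length = t2.length + 1 →
    mat.getD (i0 - 1) [] = prev →
    (∀ k, i0 ≤ k → k < mat.length → mat.getD k [] = List.replicate (t2.length + 1) 0) →
    ((PySem.List.pyRange (i0 : Int) ((i0 : Int) + (cs.length : Int)) 1).foldl
        (fun mat i => (PySem.List.pyRange 1 ((t2.length + 1 : Nat) : Int) 1).foldl
            (mgapInnerStep ('-' :: t1) ('-' :: t2) i) mat) mat).getD (mat.length - 1) []
      = mgapRows cs t2 prev := by
  intro cs
  induction cs with
  | nil =>
      intro i0 mat prev hi hmlen hdrop hplen hprev hrest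
      rw [show PySem.List.pyRange (i0 : Int) ((i0 : Int) + (([] : List Char).length : Int)) 1 = []
          from PySem.List.pyRange_one_eq_nil (by simp)]
      simp only [List.foldl_nil, mgapRows]
      have hix : mat.length - 1 = i0 - 1 := by simp at hmlen; omega
      rw [hix, hprev]
  | cons c cs ih =>
      intro i0 mat prev hi hmlen hdrop hplen hprev hrest
      have hcons : PySem.List.pyRange (i0 : Int) ((i0 : Int) + ((c :: cs).length : Int)) 1
          = (i0 : Int) :: PySem.List.pyRange ((i0 : Int) + 1) ((i0 : Int) + ((c :: cs).length : Int)) 1 := by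
        apply PySem.List.pyRange_one_cons
        have : (0 : Int) < ((c :: cs).length : Int) := by simp
        omega
      rw [hcons]
      simp only [List.foldl_cons]
      have hilen : i0 < mat.length := by simp [hmlen]
      -- the first inner loop produces row mgapRow c t2 prev
      have hchar : ('-' :: t1).getD i0 '-' = c := by
        have ht1 : t1[i0 - 1]? = some c := by rw [← List.head?_drop, hdrop]; rfl
        have : i0 = (i0 - 1) + 1 := by omega
        rw [this]
        simp [List.getD, ht1]
      have hrange1 : ((t2.length + 1 : Nat) : Int) = (1 : Int) + (t2.length : Int) := by push_cast; ring
      have hinner : (PySem.List.pyRange 1 ((t2.length + 1 : Nat) : Int) 1).foldl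
            (mgapInnerStep ('-' :: t1) ('-' :: t2) (i0 : Int)) mat
          = mat.set i0 (mgapRow c t2 prev) := by
        have h := inner_loop ('-' :: t1) t2 i0 hi t2 1 mat [0] prev 0 (Nat.le_refl 1) hilen
          (by simp) hprev
          (by rw [hrest i0 (Nat.le_refl i0) hilen]; simp [List.replicate_succ])
          rfl rfl
        simp only [Nat.cast_one] at h
        rw [hchar] at h
        rw [hrange1, h]
        simp [mgapRow]
      rw [hinner]
      set prev' := mgapRow c t2 prev with hp'
      have hp'len : prev'.length = t2.length + 1 := by
        simp [hp', mgapRow, mgapRowAux_length]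
      have hmlen' : (mat.set i0 prev').length = mat.length := by simp
      have hr1 : (i0 : Int) + 1 = ((i0 + 1 : Nat) : Int) := by push_cast; ring
      have hr2 : (i0 : Int) + ((c :: cs).length : Int) = ((i0 + 1 : Nat) : Int) + (cs.length : Int) := by
        simp; ring
      rw [hr1, hr2]
      have := ih (i0 + 1) (mat.set i0 prev') prev' (by omega)
        (by simp [hmlen]; omega)
        (by have : (i0 + 1) - 1 = (i0 - 1) + 1 := by omega
            rw [this, ← List.tail_drop, hdrop]; rfl)
        hp'len
        (by rw [Nat.add_sub_cancel]; exact getD_set_self _ _ _ hilen)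
        (by intro k hk hklen
            rw [getD_set_ne _ _ _ _ (by omega)]
            exact hrest k (by omega) (by simpa using hklen))
      rw [hmlen'] at this
      rw [this]
      simp only [mgapRows]
      rw [hp']

-- ---- rows of the table are rows of mgapL ----

theorem rowAux_eq (s1 s2 : List Char) (i : Nat) :
    ∀ (ds : List Char) (j0 : Nat), ds = s2.drop j0 →
    mgapRowAux (s1.getD i ' ') ds
        ((List.range' j0 (s2.length + 1 - j0)).map (fun j => mgapL s1 s2 i j))
        (mgapL s1 s2 (i + 1) j0)
      = (List.range' (j0 + 1) ds.length).map (fun j => mgapL s1 s2 (i + 1) j) := by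
  intro ds
  induction ds with
  | nil => intro j0 h; simp [mgapRowAux]
  | cons d ds ihd =>
    intro j0 hds
    have hlen : ds.length + 1 = s2.length - j0 := by
      have h := congrArg List.length hds
      simpa using h
    have hj0 : j0 < s2.length := by omega
    have hd : s2[j0]? = some d := by rw [← List.head?_drop, ← hds]; rfl
    have hdg : s2.getD j0 ' ' = d := by simp [List.getD, hd]
    have hk : s2.length + 1 - j0 = (s2.length - (j0 + 1)) + 1 + 1 := by omega
    rw [hk, List.range'_succ, List.map_cons, List.range'_succ, List.map_cons]
    simp only [mgapRowAux, List.headD_cons, List.tail_cons]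
    have hv : (if s1.getD i ' ' = d then mgapL s1 s2 i j0 + 1
        else max (mgapL s1 s2 (i + 1) j0) (mgapL s1 s2 i (j0 + 1)))
        = mgapL s1 s2 (i + 1) (j0 + 1) := by
      rw [mgapL_succ, hdg]
    rw [hv]
    have hds' : ds = s2.drop (j0 + 1) := by
      rw [← List.tail_drop, ← hds]
      rfl
    have hih := ihd (j0 + 1) hds'
    have hk2 : s2.length + 1 - (j0 + 1) = (s2.length - (j0 + 1)) + 1 := by omega
    rw [hk2, List.range'_succ, List.map_cons] at hih
    rw [hih, List.length_cons, List.range'_succ, List.map_cons]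

theorem rows_eq (s1 s2 : List Char) :
    ∀ (cs : List Char) (i0 : Nat), i0 ≤ s1.length → cs = s1.drop i0 →
    mgapRows cs s2 ((List.range' 0 (s2.length + 1)).map (fun j => mgapL s1 s2 i0 j))
      = (List.range' 0 (s2.length + 1)).map (fun j => mgapL s1 s2 s1.length j) := by
  intro cs
  induction cs with
  | nil =>
    intro i0 hle hdrop
    have h := congrArg List.length hdrop
    simp only [List.length_nil, List.length_drop] at h
    have : i0 = s1.length := by omega
    subst this
    simp [mgapRows]
  | cons c cs ihc =>
    intro i0 hle hdrop
    have hlen : cs.length + 1 = s1.length - i0 := by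
      have h := congrArg List.length hdrop
      simpa using h
    have hi0 : i0 < s1.length := by omega
    have hc : s1[i0]? = some c := by rw [← List.head?_drop, ← hdrop]; rfl
    have hcg : s1.getD i0 ' ' = c := by simp [List.getD, hc]
    simp only [mgapRows]
    have hrow : mgapRow c s2 ((List.range' 0 (s2.length + 1)).map (fun j => mgapL s1 s2 i0 j))
        = (List.range' 0 (s2.length + 1)).map (fun j => mgapL s1 s2 (i0 + 1) j) := by
      have haux := rowAux_eq s1 s2 i0 s2 0 (by simp)
      rw [Nat.sub_zero] at haux
      have h0 : mgapL s1 s2 (i0 + 1) 0 = 0 := mgapL_zero s1 s2 (i0 + 1) 0 (Or.inr rfl)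
      rw [h0] at haux
      rw [mgapRow, hcg.symm, haux, List.range'_succ, List.map_cons, h0]
    rw [hrow]
    exact ihc (i0 + 1) (by omega) (by rw [← List.tail_drop, ← hdrop]; rfl)

theorem row0 (s1 s2 : List Char) :
    (List.range' 0 (s2.length + 1)).map (fun j => mgapL s1 s2 0 j)
      = List.replicate (s2.length + 1) (0 : Int) := by
  rw [List.eq_replicate_iff]
  refine ⟨by simp, ?_⟩
  intro b hb
  simp only [List.mem_map] at hb
  obtain ⟨j, -, rfl⟩ := hb
  exact mgapL_zero s1 s2 0 j (Or.inl rfl)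

theorem lastRow (s1 s2 : List Char) (i : Nat) :
    ((List.range' 0 (s2.length + 1)).map (fun j => mgapL s1 s2 i j)).getD (s2.length + 1 - 1) 0
      = mgapL s1 s2 i s2.length := by
  have h2 : s2.length + 1 - 1 = s2.length := by omega
  rw [h2]
  simp [List.getD]


-- ===== VERDICT (by name: the statement is the Claim_ definition above) =====
theorem max_gap_symbols_spec : Claim_equal_max_gap_symbols := by
  intro str1 str2 _
  unfold Spec_max_gap_symbols
  rw [alt_eq_L]
  unfold max_gap_symbols
  set t1 := str1.toList
  set t2 := str2.toList
  have hlen1 : ('-' :: t1).length = t1.length + 1 := by simp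
  have hlen2 : ('-' :: t2).length = t2.length + 1 := by simp
  simp only [hlen1, hlen2]
  have h1 : ((t1.length + 1 : Nat) : Int) = (1 : Int) + (t1.length : Int) := by push_cast; ring
  have houter := outer_loop t1 t2 t1 1
    (List.replicate (t1.length + 1) (List.replicate (t2.length + 1) 0))
    (List.replicate (t2.length + 1) 0)
    (Nat.le_refl 1)
    (by simp [Nat.add_comm])
    (by simp)
    (by simp)
    (by simp [List.getD])
    (by intro k hk hklen; simp at hklen; simp [List.getD, hklen])
  simp only [List.length_replicate, Nat.cast_one] at houter
  rw [h1, houter, ← row0 t1 t2, rows_eq t1 t2 t1 0 (Nat.zero_le _) (by simp), lastRow]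
  push_cast
  ring
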